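-- pv_equiv track=rewrite | github.com/taylorperkins/foobar | logic/ion_flux_relabeling.py | calculate_first_ind_row
-- ===== SOURCE A (Python) =====
-- def calculate_first_ind_row(h):
--     col = list()
--     # Go one higher in order to see if highest val has parent
--     for i in range(h):
--         try:
--             col.append((col[-1]*2) + 1)
--         except IndexError:
--             col.append(1)
--
--     return col
-- ===== SOURCE B (Python) =====
-- def calculate_first_ind_row(h):
--     return [(1 << (i + 1)) - 1 for i in range(h)]
-- ===== Notes on version B (the rewrite author's own statement) =====
-- stated objective: simpler
-- what changed: Replaces the stateful loop with its col[-1]*2+1 recurrence and try/except by a one-line closed-form comprehension computing each entry 2^(i+1)-1 directly from its index.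
import Mathlib
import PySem

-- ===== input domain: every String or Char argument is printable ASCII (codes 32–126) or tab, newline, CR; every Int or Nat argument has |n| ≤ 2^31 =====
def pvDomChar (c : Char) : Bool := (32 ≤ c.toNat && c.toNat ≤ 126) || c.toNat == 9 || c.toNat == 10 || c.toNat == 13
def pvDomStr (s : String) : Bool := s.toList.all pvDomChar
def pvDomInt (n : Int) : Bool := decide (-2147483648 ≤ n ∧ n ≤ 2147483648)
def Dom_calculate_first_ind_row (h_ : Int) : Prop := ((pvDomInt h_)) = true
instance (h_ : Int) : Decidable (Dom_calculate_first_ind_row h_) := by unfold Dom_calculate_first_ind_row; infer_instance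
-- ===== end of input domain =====

-- B replaces A's stateful loop (col[-1]*2+1 with try/except) by the closed form 2^(i+1)-1 per index (simpler).

-- ===== PORT A =====
def calculate_first_ind_row (h_ : Int) : List Int :=
  (PySem.List.pyRange 0 h_ 1).foldl (fun col _i =>
    match PySem.List.pyGet? col (-1) with
    | some last => col ++ [last * 2 + 1]   -- try branch: col.append(col[-1]*2 + 1)
    | none      => col ++ [1]) []          -- except IndexError: col.append(1)

-- ===== PORT B =====
def calculate_first_ind_row_alt (h_ : Int) : List Int :=
  (PySem.List.pyRange 0 h_ 1).map (fun i => 2 ^ (i + 1).toNat - 1)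

-- ===== PRECONDITION & SPEC =====
def Spec_calculate_first_ind_row (h_ : Int) (out : List Int) : Prop := out = calculate_first_ind_row_alt h_
instance (h_ : Int) (out : List Int) : Decidable (Spec_calculate_first_ind_row h_ out) := by unfold Spec_calculate_first_ind_row; infer_instance

-- ===== CLAIM (what is proved, stated in full; the proofs are below) =====
def Claim_equal_calculate_first_ind_row : Prop := ∀ (h_ : Int), Dom_calculate_first_ind_row h_ → Spec_calculate_first_ind_row h_ (calculate_first_ind_row h_)

-- ===== LEMMAS AND PROOFS =====

-- the loop body as a named function, for readability of the lemmas
def pvStepA (col : List Int) : List Int :=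
  match PySem.List.pyGet? col (-1) with
  | some last => col ++ [last * 2 + 1]
  | none      => col ++ [1]

lemma pvMain (n : Nat) :
    (PySem.List.pyRange 0 (n : Int) 1).foldl (fun col _i => pvStepA col) [] =
      (PySem.List.pyRange 0 (n : Int) 1).map (fun i => 2 ^ (i + 1).toNat - 1) := by
  induction n with
  | zero => simp [PySem.List.pyRange_one_eq_nil]
  | succ n ih =>
    have hsplit : PySem.List.pyRange 0 ((n : Int) + 1) 1 =
        PySem.List.pyRange 0 (n : Int) 1 ++ [(n : Int)] :=
      PySem.List.pyRange_one_succ_right (by positivity)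
    push_cast
    rw [hsplit, List.foldl_append, List.map_append, ih]
    simp only [List.foldl_cons, List.foldl_nil, List.map_cons, List.map_nil]
    cases n with
    | zero =>
      simp [PySem.List.pyRange_one_eq_nil, pvStepA, PySem.List.pyGet?]
    | succ m =>
      have hsplit2 : PySem.List.pyRange 0 ((m : Int) + 1) 1 =
          PySem.List.pyRange 0 (m : Int) 1 ++ [(m : Int)] :=
        PySem.List.pyRange_one_succ_right (by positivity)
      unfold pvStepA
      push_cast
      rw [hsplit2, List.map_append]
      simp only [List.map_cons, List.map_nil]
      rw [PySem.List.pyGet?_neg_one_append_singleton]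
      have htn : ((m:Int) + 1).toNat = m + 1 := by omega
      have htn2 : ((m:Int) + 1 + 1).toNat = m + 2 := by omega
      simp only [htn, htn2]
      have h2 : ((2:Int) ^ (m + 1) - 1) * 2 + 1 = 2 ^ (m + 2) - 1 := by ring
      rw [h2]

-- ===== VERDICT (by name: the statement is the Claim_ definition above) =====
theorem calculate_first_ind_row_spec : Claim_equal_calculate_first_ind_row := by
  intro h_ _
  unfold Spec_calculate_first_ind_row calculate_first_ind_row calculate_first_ind_row_alt
  rcases lt_or_ge 0 h_ with hpos | hle
  · have : h_ = ((h_.toNat : Nat) : Int) := by omega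
    rw [this]
    exact pvMain h_.toNat
  · simp [PySem.List.pyRange_one_eq_nil hle]
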